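-- pv_equiv track=rewrite | github.com/DavitPoghosyan177/lessonsgroup2 | first.py | vowel_scanner
-- ===== SOURCE A (Python) =====
-- def vowel_scanner(ml):
--     vow = "AaEeIiOoUu"
--     st = ''
--     mlen = 0
--     for i in ml:
--         if type(i) == str:
--             vlen = len([el for el in i if el in vow])
--
--             if vlen > mlen:
--                 mlen = vlen
--                 st = i
--     return str(st)
-- ===== SOURCE B (Python) =====
-- def vowel_scanner(ml):
--     vow = "AaEeIiOoUu"
--     # staged: candidates, then their vowel counts, then max, then first index
--     strs = [s for s in ml if type(s) == str]
--     counts = [sum(c in vow for c in s) for s in strs]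
--     m = max(counts, default=0)
--     if m == 0:
--         return ''
--     return str(strs[counts.index(m)])
-- ===== Notes on version B (the rewrite author's own statement) =====
-- stated objective: alternative
-- what changed: Replaces A's single-pass best-so-far accumulator loop by staged whole-list passes: build the count list, take its maximum, then locate the first index attaining it (list.index) and select that element.
import Mathlib
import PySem

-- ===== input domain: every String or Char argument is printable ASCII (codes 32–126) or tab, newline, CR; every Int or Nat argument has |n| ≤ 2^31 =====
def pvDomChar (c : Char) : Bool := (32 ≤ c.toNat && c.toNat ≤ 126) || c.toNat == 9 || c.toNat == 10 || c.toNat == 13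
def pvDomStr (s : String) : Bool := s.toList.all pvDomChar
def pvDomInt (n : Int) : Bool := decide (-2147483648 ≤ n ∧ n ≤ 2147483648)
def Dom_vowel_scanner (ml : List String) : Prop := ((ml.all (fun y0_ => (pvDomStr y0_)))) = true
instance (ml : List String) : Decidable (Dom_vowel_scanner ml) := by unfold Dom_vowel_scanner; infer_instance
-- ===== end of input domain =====

-- B replaces A's single-pass best-so-far loop by staged passes: candidate list,
-- count list, max of counts, first index of the max (alternative; same cost).


-- ===== PORT A =====
-- vlen = len([el for el in i if el in vow])
def pvVlenA (i : String) : Nat :=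
  (i.toList.filter (fun el => el ∈ "AaEeIiOoUu".toList)).length

-- literal port of A's loop; 'type(i) == str' always holds on List String
def vowel_scanner (ml : List String) : String :=
  (ml.foldl
    (fun (acc : String × Nat) i =>
      let vlen := pvVlenA i
      if vlen > acc.2 then (i, vlen) else acc)
    ("", 0)).1

-- ===== PORT B =====
-- sum(c in vow for c in s)
def pvKeyB (s : String) : Int :=
  (s.toList.map (fun c => if c ∈ "AaEeIiOoUu".toList then (1 : Int) else 0)).sum

-- staged passes of Source B: strs (type filter trivial on List String), counts,
-- m = max(counts, default=0), then strs[counts.index(m)].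
-- When m ≠ 0 the index exists and is in range; '.getD ""' / none-branch are
-- unreachable and only make the port total.
def vowel_scanner_alt (ml : List String) : String :=
  let strs := ml
  let counts := strs.map pvKeyB
  let m := (PySem.List.max? counts (fun x => x)).getD 0
  if m = 0 then ""
  else
    match PySem.List.index? counts m with
    | some j => (PySem.List.pyGet? strs (j : Int)).getD ""
    | none => ""

-- ===== PRECONDITION & SPEC =====
def Spec_vowel_scanner (ml : List String) (out : String) : Prop := out = vowel_scanner_alt ml
instance (ml : List String) (out : String) : Decidable (Spec_vowel_scanner ml out) := by unfold Spec_vowel_scanner; infer_instance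

-- ===== CLAIM (what is proved, stated in full; the proofs are below) =====
def Claim_equal_vowel_scanner : Prop := ∀ (ml : List String), Dom_vowel_scanner ml → Spec_vowel_scanner ml (vowel_scanner ml)

-- ===== LEMMAS AND PROOFS =====
theorem sum_ite_eq_filter_len (l : List Char) :
    (l.map (fun c => if c ∈ "AaEeIiOoUu".toList then (1 : Int) else 0)).sum
    = ((l.filter (fun el => el ∈ "AaEeIiOoUu".toList)).length : Int) := by
  induction l with
  | nil => simp
  | cons c tl ih =>
    simp only [List.map_cons, List.sum_cons, List.filter_cons, ih]
    by_cases h : c ∈ "AaEeIiOoUu".toList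
    · rw [if_pos h, decide_eq_true h]
      simp only [if_true, List.length_cons]
      push_cast; omega
    · rw [if_neg h, decide_eq_false h]
      simp

theorem pvKeyB_eq (s : String) : pvKeyB s = (pvVlenA s : Int) := by
  simpa [pvKeyB, pvVlenA] using sum_ite_eq_filter_len s.toList

-- the running max is m itself or attained by a list element
theorem foldl_max_attained (l : List Nat) (m : Nat) :
    List.foldl Nat.max m l = m ∨ ∃ x ∈ l, List.foldl Nat.max m l = x := by
  induction l generalizing m with
  | nil => left; rfl
  | cons a tl ih =>
    rcases ih (Nat.max m a) with h | ⟨x, hx, hfx⟩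
    · by_cases ham : a ≤ m
      · left; simpa [List.foldl_cons, Nat.max_eq_left ham] using h
      · right; exact ⟨a, List.mem_cons_self, by simpa [List.foldl_cons, Nat.max_eq_right (le_of_not_ge ham)] using h⟩
    · right; exact ⟨x, List.mem_cons_of_mem _ hx, hfx⟩

-- characterisation of A's fold: running max, and first element attaining it
theorem fold_char (ml : List String) (st : String) (m : Nat) :
    (ml.foldl
      (fun (acc : String × Nat) i =>
        if pvVlenA i > acc.2 then (i, pvVlenA i) else acc)
      (st, m))
    = (if List.foldl Nat.max m (ml.map pvVlenA) = m then st
       else (ml.find? (fun i => pvVlenA i == List.foldl Nat.max m (ml.map pvVlenA))).getD st,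
       List.foldl Nat.max m (ml.map pvVlenA)) := by
  induction ml generalizing st m with
  | nil => simp
  | cons i tl ih =>
    simp only [List.foldl_cons, List.map_cons, List.find?_cons]
    by_cases h : pvVlenA i > m
    · rw [if_pos h]
      rw [ih i (pvVlenA i)]
      have hm : Nat.max m (pvVlenA i) = pvVlenA i := Nat.max_eq_right (le_of_lt h)
      rw [hm]
      set M := List.foldl Nat.max (pvVlenA i) (tl.map pvVlenA) with hM
      have hMge : pvVlenA i ≤ M := (PySem.List.le_foldl_max _ _).1
      have hMm : M ≠ m := by omega
      rw [if_neg hMm]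
      by_cases he : pvVlenA i = M
      · rw [if_pos he.symm]
        have hb : (pvVlenA i == M) = true := by simp [he]
        rw [hb]
        rfl
      · have hb : (pvVlenA i == M) = false := by simp [he]
        rw [hb, if_neg (fun hc => he hc.symm)]
        rcases foldl_max_attained (tl.map pvVlenA) (pvVlenA i) with hc | ⟨x, hx, hfx⟩
        · exact absurd (hM.trans hc).symm he
        · rcases List.mem_map.1 hx with ⟨s, hs, hvs⟩
          have hxM : x = M := (hM.trans hfx).symm
          have : (tl.find? (fun j => pvVlenA j == M)).isSome := by
            rw [List.find?_isSome]
            exact ⟨s, hs, by simp [hvs, hxM]⟩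
          rcases Option.isSome_iff_exists.1 this with ⟨w, hw⟩
          simp [hw]
    · rw [if_neg h]
      rw [ih st m]
      have hm : Nat.max m (pvVlenA i) = m := Nat.max_eq_left (le_of_not_gt h)
      rw [hm]
      set M := List.foldl Nat.max m (tl.map pvVlenA) with hM
      have hMge : m ≤ M := (PySem.List.le_foldl_max _ _).1
      by_cases hMm : M = m
      · simp [hMm]
      · have hb : (pvVlenA i == M) = false := by
          simp only [beq_eq_false_iff_ne, ne_eq]
          omega
        simp [hMm, hb]

-- Int running max of the cast counts = cast of the Nat running max
theorem foldl_max_cast (l : List String) (a : Nat) :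
    List.foldl max ((a : Int)) (l.map pvKeyB)
    = ((List.foldl Nat.max a (l.map pvVlenA) : Nat) : Int) := by
  induction l generalizing a with
  | nil => simp
  | cons s tl ih =>
    simp only [List.map_cons, List.foldl_cons, pvKeyB_eq]
    rw [show max ((a : Int)) ((pvVlenA s : Nat) : Int) = ((Nat.max a (pvVlenA s) : Nat) : Int) by
      push_cast [Nat.cast_max]; rfl]
    exact ih _

-- first index of c in the count list selects the first element with that count
theorem index_map_get (ml : List String) (c : Int) (hex : ∃ s ∈ ml, pvKeyB s = c) :
    ∃ j s, PySem.List.index? (ml.map pvKeyB) c = some j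
      ∧ PySem.List.pyGet? ml ((j : Nat) : Int) = some s
      ∧ ml.find? (fun i => pvKeyB i == c) = some s := by
  induction ml with
  | nil => rcases hex with ⟨s, hs, _⟩; cases hs
  | cons x tl ih =>
    by_cases hx : pvKeyB x = c
    · refine ⟨0, x, ?_, ?_, ?_⟩
      · subst hx; simpa using PySem.List.index?_cons_self (x := pvKeyB x) (xs := tl.map pvKeyB)
      · simp [PySem.List.pyGet?, PySem.List.pyIdx?]
      · simp [hx]
    · have hex' : ∃ s ∈ tl, pvKeyB s = c := by
        rcases hex with ⟨s, hs, hc⟩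
        rcases List.mem_cons.1 hs with rfl | hs'
        · exact absurd hc hx
        · exact ⟨s, hs', hc⟩
      rcases ih hex' with ⟨j, s, hidx, hget, hfind⟩
      refine ⟨j + 1, s, ?_, ?_, ?_⟩
      · rw [List.map_cons, PySem.List.index?_cons_of_ne _ hx, hidx]; rfl
      · rw [show (((j + 1 : Nat) : Int)) = ((j : Nat) : Int) + 1 by push_cast; ring]
        rw [PySem.List.pyGet?_cons_succ]
        exact hget
      · simp [hx, hfind]

theorem find_congr_key (ml : List String) (M : Nat) :
    ml.find? (fun i => pvKeyB i == ((M : Nat) : Int)) = ml.find? (fun i => pvVlenA i == M) := by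
  induction ml with
  | nil => rfl
  | cons x tl ih =>
    simp only [List.find?_cons]
    have hb : (pvKeyB x == ((M : Nat) : Int)) = (pvVlenA x == M) := by
      rw [pvKeyB_eq]
      by_cases h : pvVlenA x = M
      · simp [h]
      · have h' : ((pvVlenA x : Nat) : Int) ≠ ((M : Nat) : Int) := by exact_mod_cast h
        simp [h, h']
    rw [hb]
    cases pvVlenA x == M <;> simp [ih]

-- ===== VERDICT (by name: the statement is the Claim_ definition above) =====
theorem vowel_scanner_spec : Claim_equal_vowel_scanner := by
  intro ml _
  show vowel_scanner ml = vowel_scanner_alt ml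
  unfold vowel_scanner vowel_scanner_alt
  rw [fold_char]
  cases ml with
  | nil => simp [PySem.List.max?]
  | cons x tl =>
    simp only [List.map_cons]
    rw [PySem.List.max?_id_cons, Option.getD_some, pvKeyB_eq x, foldl_max_cast]
    set M := List.foldl Nat.max (pvVlenA x) (tl.map pvVlenA) with hM
    have hfold : List.foldl Nat.max 0 (pvVlenA x :: tl.map pvVlenA) = M := by
      rw [List.foldl_cons]
      have h00 : Nat.max 0 (pvVlenA x) = pvVlenA x := Nat.zero_max _
      rw [h00]
    by_cases h0 : M = 0
    · have h0' : ((M : Nat) : Int) = 0 := by exact_mod_cast h0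
      rw [if_pos h0']
      simp [hfold, h0]
    · have hne : ((M : Nat) : Int) ≠ 0 := by exact_mod_cast h0
      rw [if_neg hne, hfold, if_neg h0]
      have hex : ∃ s ∈ x :: tl, pvKeyB s = ((M : Nat) : Int) := by
        rcases foldl_max_attained (tl.map pvVlenA) (pvVlenA x) with hc | ⟨y, hy, hfy⟩
        · exact ⟨x, List.mem_cons_self, by rw [pvKeyB_eq, hM, hc]⟩
        · rcases List.mem_map.1 hy with ⟨s, hs, hvs⟩
          exact ⟨s, List.mem_cons_of_mem _ hs, by rw [pvKeyB_eq, hvs, ← hfy, hM]⟩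
      rcases index_map_get (x :: tl) ((M : Nat) : Int) hex with ⟨j, s, hidx, hget, hfind⟩
      simp only [List.map_cons] at hidx
      rw [pvKeyB_eq x] at hidx
      rw [hidx]
      rw [find_congr_key] at hfind
      simp [hget, hfind]
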